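-- pv_equiv track=rewrite | github.com/unaidedelf8777/lilac_built | lilac/splitters/chunk_splitter.py | _sep_split
-- ===== SOURCE A (Python) =====
-- TextChunk = tuple[str, tuple[int, int]]
--
-- def _sep_split(text: str, separator: str) -> list[TextChunk]:
--   if separator == '':
--     # We need to split by char.
--     return [(letter, (i, i + 1)) for i, letter in enumerate(text)]
--
--   offset = 0
--   chunks: list[TextChunk] = []
--   open_code_block = False
--   end_index = text.find(separator, offset)
--
--   while end_index >= 0:
--     if separator == '```':
--       # We want to keep the code block seperators as part of the text chunk.
--       start = max(0, offset - len(separator))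
--       if open_code_block:
--         end = end_index + len(separator)
--         open_code_block = False
--       else:
--         end = end_index
--         open_code_block = True
--     else:
--       start = offset
--       end = end_index
--
--     chunks.append((text[start:end], (start, end)))
--     offset = end_index + len(separator)
--     end_index = text.find(separator, offset)
--
--   # Append the last chunk.
--   chunks.append((text[offset:], (offset, len(text))))
--
--   return chunks
-- ===== SOURCE B (Python) =====
-- TextChunk = tuple[str, tuple[int, int]]
--
-- def _sep_split(text: str, separator: str) -> list[TextChunk]:
--   if separator == '':
--     return [(letter, (i, i + 1)) for i, letter in enumerate(text)]
--
--   # Let the library split the text, then reconstruct every span from the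
--   # cumulative piece lengths; open_code_block becomes the parity of the index.
--   pieces = text.split(separator)
--   n = len(separator)
--   chunks: list[TextChunk] = []
--   pos = 0
--   last = len(pieces) - 1
--   for k, piece in enumerate(pieces):
--     if k == last:
--       chunks.append((text[pos:], (pos, len(text))))
--     elif separator == '```':
--       start = max(0, pos - 3)
--       end = pos + len(piece) + (3 if k % 2 == 1 else 0)
--       chunks.append((text[start:end], (start, end)))
--     else:
--       chunks.append((piece, (pos, pos + len(piece))))
--     pos += len(piece) + n
--   return chunks
-- ===== Notes on version B (the rewrite author's own statement) =====
-- stated objective: alternative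
-- what changed: A's find-driven while loop (find next separator, branch, append, advance, toggle a boolean) is replaced by a library text.split(separator) producing the piece list, with every span reconstructed afterwards from cumulative piece lengths and the open_code_block toggle replaced by the parity of the piece index.
import Mathlib
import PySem

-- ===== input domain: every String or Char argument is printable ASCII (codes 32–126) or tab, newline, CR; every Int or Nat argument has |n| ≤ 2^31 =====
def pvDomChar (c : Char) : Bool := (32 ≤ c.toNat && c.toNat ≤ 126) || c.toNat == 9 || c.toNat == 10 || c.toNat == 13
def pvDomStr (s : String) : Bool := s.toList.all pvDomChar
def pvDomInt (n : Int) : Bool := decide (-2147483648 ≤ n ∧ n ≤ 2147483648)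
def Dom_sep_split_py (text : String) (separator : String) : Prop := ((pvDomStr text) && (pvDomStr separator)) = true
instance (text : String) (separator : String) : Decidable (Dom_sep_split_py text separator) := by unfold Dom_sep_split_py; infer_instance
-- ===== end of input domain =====

-- B replaces A's find-driven while loop (find, branch, append, advance, toggle) by a library
-- split: text.split(separator) gives the pieces, every span is reconstructed from the cumulative
-- piece lengths, and the open_code_block toggle becomes the parity of the piece index; alternative, not faster.

-- text[a:b] for 0 ≤ a ≤ b as a String (Python slice semantics on nonnegative in-order bounds; exact by PySem.List.slice_natCast)
def pvChunkStr (t : List Char) (a b : Nat) : String := String.ofList ((t.drop a).take (b - a))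

-- ===== PORT A =====
-- the Python while-loop: state (offset, open_code_block, chunks); Python's offset is a nonnegative
-- int, kept as Nat (max(0, offset - len(sep)) is Nat subtraction offset - sep.length); fuel is only
-- a totality guard: text.length + 2 is proved sufficient below (pvLoopA_eq_build)
def pvLoopA (t sep : List Char) : Nat → Nat → Bool → List (String × (Int × Int)) → List (String × (Int × Int))
  | 0, _, _, chunks => chunks
  | fuel + 1, offset, openB, chunks =>
    let e := PySem.Chars.findFrom t sep (offset : Int) none
    if 0 ≤ e then
      let sec : Nat × Nat × Bool :=
        if sep = ['`', '`', '`'] then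
          if openB then (offset - sep.length, e.toNat + sep.length, false)
          else (offset - sep.length, e.toNat, true)
        else (offset, e.toNat, openB)
      pvLoopA t sep fuel (e.toNat + sep.length) sec.2.2
        (chunks ++ [(pvChunkStr t sec.1 sec.2.1, ((sec.1 : Int), (sec.2.1 : Int)))])
    else chunks ++ [(String.ofList (t.drop offset), ((offset : Int), (t.length : Int)))]

def sep_split_py (text : String) (separator : String) : List (String × (Int × Int)) :=
  if separator.toList = [] then
    (PySem.List.enumerate text.toList 0).map (fun p => (String.ofList [p.2], (p.1, p.1 + 1)))
  else
    pvLoopA text.toList separator.toList (text.toList.length + 2) 0 false []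

-- ===== PORT B =====
-- Source B's loop over enumerate(pieces): k is the piece index, pos the running start offset;
-- the last piece yields the tail chunk, a '```' piece keeps the fences by index parity,
-- an ordinary piece is emitted as-is with its cumulative span
def pvBuildB (t sep : List Char) : List (List Char) → Nat → Nat → List (String × (Int × Int))
  | [], _, _ => []
  | [_], _, pos => [(String.ofList (t.drop pos), ((pos : Int), (t.length : Int)))]
  | piece :: rest, k, pos =>
    (if sep = ['`', '`', '`'] then
       (pvChunkStr t (pos - 3) (pos + piece.length + (if k % 2 = 1 then 3 else 0)),
        (((pos - 3 : Nat) : Int), ((pos + piece.length + (if k % 2 = 1 then 3 else 0) : Nat) : Int)))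
     else (String.ofList piece, ((pos : Int), ((pos + piece.length : Nat) : Int))))
    :: pvBuildB t sep rest (k + 1) (pos + piece.length + sep.length)

def sep_split_py_alt (text : String) (separator : String) : List (String × (Int × Int)) :=
  if separator.toList = [] then
    (PySem.List.enumerate text.toList 0).map (fun p => (String.ofList [p.2], (p.1, p.1 + 1)))
  else
    pvBuildB text.toList separator.toList
      (PySem.Chars.splitOn text.toList separator.toList) 0 0

-- ===== PRECONDITION & SPEC =====
def Spec_sep_split_py (text : String) (separator : String) (out : List (String × (Int × Int))) : Prop := out = sep_split_py_alt text separator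
instance (text : String) (separator : String) (out : List (String × (Int × Int))) : Decidable (Spec_sep_split_py text separator out) := by unfold Spec_sep_split_py; infer_instance

-- ===== CLAIM (what is proved, stated in full; the proofs are below) =====
def Claim_equal_sep_split_py : Prop := ∀ (text : String) (separator : String), Dom_sep_split_py text separator → Spec_sep_split_py text separator (sep_split_py text separator)

-- ===== LEMMAS AND PROOFS =====

-- proof-only model of the piece list: the pieces of l split at successive find positions
def pvPieces (sep : List Char) : Nat → List Char → List (List Char)
  | 0, l => [l]
  | fuel + 1, l =>
    let j := PySem.Chars.find l sep
    if j = -1 then [l]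
    else l.take j.toNat :: pvPieces sep fuel (l.drop (j.toNat + sep.length))

theorem pvPieces_ne_nil (sep : List Char) (fuel : Nat) (l : List Char) :
    pvPieces sep fuel l ≠ [] := by
  cases fuel with
  | zero => simp [pvPieces]
  | succ n => simp only [pvPieces]; split <;> simp

theorem pvFind_bound (l sep : List Char)
    (h : PySem.Chars.find l sep ≠ -1) :
    0 ≤ PySem.Chars.find l sep ∧
      (PySem.Chars.find l sep).toNat + sep.length ≤ l.length := by
  have h0 : PySem.Chars.findFrom l sep ((0 : Nat) : Int) none = PySem.Chars.find l sep := by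
    simp
  obtain ⟨-, h2, -⟩ := PySem.Chars.findFrom_natCast_spec l sep 0 (by omega)
    (by rw [h0]; exact h)
  rw [h0] at h2
  have hge : -1 ≤ PySem.Chars.find l sep := PySem.Chars.neg_one_le_find l sep
  have hpos : 0 ≤ PySem.Chars.find l sep := by omega
  refine ⟨hpos, ?_⟩
  have hlen := h2.length_le
  have hle : PySem.Chars.find l sep ≤ (l.length : Int) := PySem.Chars.find_le_length l sep
  have hd : (List.drop (PySem.Chars.find l sep).toNat l).length
      = l.length - (PySem.Chars.find l sep).toNat := List.length_drop ..
  omega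

theorem pvPieces_congr (sep : List Char) (hs : sep ≠ []) :
    ∀ f1 f2 l, l.length < f1 → l.length < f2 →
      pvPieces sep f1 l = pvPieces sep f2 l := by
  intro f1
  induction f1 with
  | zero => intro f2 l h1; omega
  | succ n ih =>
    intro f2 l h1 h2
    obtain ⟨m, rfl⟩ : ∃ m, f2 = m + 1 := ⟨f2 - 1, by omega⟩
    simp only [pvPieces]
    by_cases hf : PySem.Chars.find l sep = -1
    · simp [hf]
    · obtain ⟨-, hb⟩ := pvFind_bound l sep hf
      have hlen : 1 ≤ sep.length := List.length_pos_iff.mpr hs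
      have hd : (List.drop ((PySem.Chars.find l sep).toNat + sep.length) l).length
          = l.length - ((PySem.Chars.find l sep).toNat + sep.length) := List.length_drop ..
      simp only [hf, if_neg, not_false_iff]
      rw [ih m (List.drop ((PySem.Chars.find l sep).toNat + sep.length) l) (by omega) (by omega)]

theorem pvFindGo_shift (sub : List Char) :
    ∀ (l : List Char) (k : Nat),
      PySem.Chars.find.go sub l k =
        if PySem.Chars.find.go sub l 0 = -1 then -1
        else (k : Int) + PySem.Chars.find.go sub l 0 := by
  have step : ∀ (c : Char) (rest : List Char) (k : Nat),
      PySem.Chars.find.go sub (c :: rest) k =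
        if sub.isPrefixOf (c :: rest) = true then (k : Int)
        else PySem.Chars.find.go sub rest (k + 1) := by
    intro c rest k; rw [PySem.Chars.find.go]
  intro l
  induction l with
  | nil =>
    intro k
    simp only [PySem.Chars.find.go]
    split <;> simp
  | cons c rest ih =>
    intro k
    rw [step, step]
    by_cases hp : sub.isPrefixOf (c :: rest)
    · simp [hp]
    · simp only [hp, Bool.false_eq_true, if_false]
      rw [ih (k + 1), ih 1]
      split
      · rfl
      · have hge : -1 ≤ PySem.Chars.find.go sub rest 0 := by
          have := PySem.Chars.neg_one_le_find rest sub
          simpa [PySem.Chars.find] using this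
        rw [if_neg (by omega)]
        push_cast; ring

theorem pvSplitOnGo_eq (sep : List Char) (hs : sep ≠ []) :
    ∀ fuel (l cur : List Char) (accL : List (List Char)), l.length < fuel →
      PySem.Chars.splitOn.go sep fuel l cur accL =
        accL.reverse ++ (cur.reverse ++ (pvPieces sep fuel l).headI) :: (pvPieces sep fuel l).tail := by
  have hlen : 1 ≤ sep.length := List.length_pos_iff.mpr hs
  intro fuel
  induction fuel with
  | zero => intro l cur accL h; omega
  | succ n ih =>
    intro l cur accL h
    cases l with
    | nil =>
      rw [PySem.Chars.splitOn.go]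
      have hf : PySem.Chars.find ([] : List Char) sep = -1 := by
        rw [PySem.Chars.find, PySem.Chars.find.go]
        simp [List.isEmpty_iff, hs]
      · simp [pvPieces, hf]
      · omega
    | cons c rest =>
      rw [PySem.Chars.splitOn.go]
      by_cases hp : sep.isPrefixOf (c :: rest)
      · simp only [hp, if_pos]
        have hf : PySem.Chars.find (c :: rest) sep = 0 := by
          rw [PySem.Chars.find, PySem.Chars.find.go]; simp [hp]
        have hdl : (List.drop sep.length (c :: rest)).length < n := by
          have hd : (List.drop sep.length (c :: rest)).length
              = (c :: rest).length - sep.length := List.length_drop ..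
          simp only [List.length_cons] at hd h ⊢; omega
        rw [ih (List.drop sep.length (c :: rest)) [] (cur.reverse :: accL) hdl]
        have hP : pvPieces sep (n + 1) (c :: rest)
            = [] :: pvPieces sep n (List.drop sep.length (c :: rest)) := by
          simp [pvPieces, hf]
        obtain ⟨q, Q, hQ⟩ : ∃ q Q, pvPieces sep n (List.drop sep.length (c :: rest)) = q :: Q :=
          List.exists_cons_of_ne_nil (pvPieces_ne_nil sep n _)
        simp [hP, hQ]
      · simp only [hp, Bool.false_eq_true, if_false]
        rw [ih rest (c :: cur) accL (by simp only [List.length_cons] at h; omega)]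
        have hstep : PySem.Chars.find (c :: rest) sep
            = if PySem.Chars.find rest sep = -1 then -1 else 1 + PySem.Chars.find rest sep := by
          rw [PySem.Chars.find, PySem.Chars.find.go]
          simp only [hp, Bool.false_eq_true, if_false]
          rw [pvFindGo_shift sep rest 1]
          rw [show PySem.Chars.find rest sep = PySem.Chars.find.go sep rest 0 from rfl]
          norm_num
        by_cases hr : PySem.Chars.find rest sep = -1
        · have hfr : pvPieces sep n rest = [rest] := by
            cases n <;> simp [pvPieces, hr]
          have hl : pvPieces sep (n + 1) (c :: rest) = [c :: rest] := by
            simp [pvPieces, hstep, hr]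
          simp [hfr, hl]
        · obtain ⟨hpos, hb⟩ := pvFind_bound rest sep hr
          obtain ⟨m, rfl⟩ : ∃ m, n = m + 1 := ⟨n - 1, by simp only [List.length_cons] at h; omega⟩
          have hj : (1 + PySem.Chars.find rest sep).toNat
              = (PySem.Chars.find rest sep).toNat + 1 := by omega
          have hl : pvPieces sep (m + 2) (c :: rest)
              = (c :: rest.take (PySem.Chars.find rest sep).toNat)
                :: pvPieces sep (m + 1)
                    (rest.drop ((PySem.Chars.find rest sep).toNat + sep.length)) := by
            rw [show (m + 2) = (m + 1) + 1 from rfl]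
            simp only [pvPieces, hstep, hr, if_neg, not_false_iff]
            rw [if_neg (by omega), hj]
            rw [List.take_succ_cons,
              show (PySem.Chars.find rest sep).toNat + 1 + sep.length
                = ((PySem.Chars.find rest sep).toNat + sep.length) + 1 by omega,
              List.drop_succ_cons]
          have hfr : pvPieces sep (m + 1) rest
              = rest.take (PySem.Chars.find rest sep).toNat
                :: pvPieces sep m
                    (rest.drop ((PySem.Chars.find rest sep).toNat + sep.length)) := by
            simp only [pvPieces, hr, if_neg, not_false_iff]
          have hdd : (rest.drop ((PySem.Chars.find rest sep).toNat + sep.length)).length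
              = rest.length - ((PySem.Chars.find rest sep).toNat + sep.length) :=
            List.length_drop ..
          have hcg : pvPieces sep m (rest.drop ((PySem.Chars.find rest sep).toNat + sep.length))
              = pvPieces sep (m + 1) (rest.drop ((PySem.Chars.find rest sep).toNat + sep.length)) := by
            refine pvPieces_congr sep hs m (m + 1) _ ?_ ?_ <;>
              (simp only [List.length_cons] at h; omega)
          simp [hl, hfr, hcg]

theorem pvSplitOn_eq (l sep : List Char) (hs : sep ≠ []) :
    PySem.Chars.splitOn l sep = pvPieces sep (l.length + 1) l := by
  rw [PySem.Chars.splitOn, pvSplitOnGo_eq sep hs (l.length + 1) l [] [] (by omega)]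
  obtain ⟨q, Q, hQ⟩ := List.exists_cons_of_ne_nil (pvPieces_ne_nil sep (l.length + 1) l)
  simp [hQ]

theorem pvLoopA_eq_build (t sep : List Char) (hs : sep ≠ []) :
    ∀ fuel offset openB k chunks,
      t.length + 1 - offset < fuel → offset ≤ t.length →
      (sep = ['`', '`', '`'] → (openB = true ↔ k % 2 = 1)) →
      pvLoopA t sep fuel offset openB chunks =
        chunks ++ pvBuildB t sep (pvPieces sep fuel (t.drop offset)) k offset := by
  have hlen : 1 ≤ sep.length := List.length_pos_iff.mpr hs
  intro fuel
  induction fuel with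
  | zero => intro offset openB k chunks h; omega
  | succ n ih =>
    intro offset openB k chunks h hoff hpar
    have hff := PySem.Chars.findFrom_natCast t sep offset hoff
    have hdl : (t.drop offset).length = t.length - offset := List.length_drop ..
    rw [pvLoopA]
    by_cases hr : PySem.Chars.find (t.drop offset) sep = -1
    · rw [hff]
      simp only [hr, if_pos]
      rw [if_neg (by norm_num)]
      have hP : pvPieces sep (n + 1) (t.drop offset) = [t.drop offset] := by
        simp [pvPieces, hr]
      simp [hP, pvBuildB]
    · obtain ⟨hpos, hb⟩ := pvFind_bound (t.drop offset) sep hr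
      set jn := (PySem.Chars.find (t.drop offset) sep).toNat with hjn
      rw [hff]
      simp only [hr, if_neg, not_false_iff]
      rw [if_pos (by omega)]
      have htn : ((offset : Int) + PySem.Chars.find (t.drop offset) sep).toNat
          = offset + jn := by omega
      have hP : pvPieces sep (n + 1) (t.drop offset)
          = (t.drop offset).take jn
            :: pvPieces sep n (t.drop (offset + jn + sep.length)) := by
        simp only [pvPieces, hr, if_neg, not_false_iff, ← hjn]
        rw [List.drop_drop]
        ring_nf
      have hpl : ((t.drop offset).take jn).length = jn := by
        rw [List.length_take]; omega
      obtain ⟨q, Q, hQ⟩ := List.exists_cons_of_ne_nil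
        (pvPieces_ne_nil sep n (t.drop (offset + jn + sep.length)))
      rw [htn]
      by_cases hc : sep = ['`', '`', '`']
      · subst hc
        have hp' := hpar rfl
        cases openB with
        | false =>
          have hk : ¬ k % 2 = 1 := by simp at hp'; omega
          simp only [Bool.false_eq_true, if_false, if_true]
          rw [ih (offset + jn + List.length ['`', '`', '`']) true (k + 1) _
              (by simp; omega) (by simp at hb hdl ⊢; omega)
              (by intro _; simp; omega)]
          rw [hP, hQ]
          simp only [pvBuildB, hpl, if_neg hk]
          simp [List.append_assoc]
        | true =>
          have hk : k % 2 = 1 := by simpa using hp'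
          simp only [if_pos rfl, if_true]
          rw [ih (offset + jn + List.length ['`', '`', '`']) false (k + 1) _
              (by simp; omega) (by simp at hb hdl ⊢; omega)
              (by intro _; simp; omega)]
          rw [hP, hQ]
          simp only [pvBuildB, hpl, if_pos hk]
          simp [List.append_assoc]
      · simp only [hc, if_false]
        rw [ih (offset + jn + sep.length) openB (k + 1) _
            (by omega) (by omega)
            (by intro hcc; exact absurd hcc hc)]
        rw [hP, hQ]
        simp only [pvBuildB, hc, if_false, hpl]
        have hcs : pvChunkStr t offset (offset + jn)
            = String.ofList ((t.drop offset).take jn) := by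
          rw [pvChunkStr, Nat.add_sub_cancel_left]
        simp [hcs, List.append_assoc]

-- ===== VERDICT (by name: the statement is the Claim_ definition above) =====
theorem sep_split_py_spec : Claim_equal_sep_split_py := by
  intro text separator _
  unfold Spec_sep_split_py sep_split_py sep_split_py_alt
  by_cases hsep : separator.toList = []
  · simp [hsep]
  · simp only [hsep, if_neg, not_false_iff]
    rw [pvLoopA_eq_build text.toList separator.toList hsep (text.toList.length + 2) 0 false 0 []
        (by omega) (by omega) (by intro _; simp)]
    rw [pvSplitOn_eq text.toList separator.toList hsep]
    simp only [List.drop_zero, List.nil_append]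
    rw [pvPieces_congr separator.toList hsep (text.toList.length + 2) (text.toList.length + 1) text.toList (by omega) (by omega)]
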